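-- pv_equiv track=rewrite | github.com/y3-editor/y3-lualib | .codemaker/skills/y3-ui-generator/scripts/html_to_y3_ui.py | _parse_adapter
-- ===== SOURCE A (Python) =====
-- def _parse_adapter(adapter_str):
--     """Parse adapter string like 'top,left,right' into boolean tuple."""
--     if not adapter_str:
--         return (False, False, False, False)
--
--     parts = [s.strip().lower() for s in adapter_str.split(',')]
--     return (
--         'top' in parts or 'all' in parts,
--         'bottom' in parts or 'all' in parts,
--         'left' in parts or 'all' in parts,
--         'right' in parts or 'all' in parts,
--     )
-- ===== SOURCE B (Python) =====
-- def _parse_adapter(adapter_str):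
--     """Parse adapter string like 'top,left,right' into boolean tuple."""
--     if not adapter_str:
--         return (False, False, False, False)
--
--     top = bottom = left = right = False
--     for tok in adapter_str.split(','):
--         t = tok.strip().lower()
--         if t == 'all':
--             top = bottom = left = right = True
--         elif t == 'top':
--             top = True
--         elif t == 'bottom':
--             bottom = True
--         elif t == 'left':
--             left = True
--         elif t == 'right':
--             right = True
--     return (top, bottom, left, right)
-- ===== Notes on version B (the rewrite author's own statement) =====
-- stated objective: alternative
-- what changed: Replaces the four repeated membership scans over the normalized token list with a single accumulating pass that sets four boolean flags as each token is normalized.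
import Mathlib
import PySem

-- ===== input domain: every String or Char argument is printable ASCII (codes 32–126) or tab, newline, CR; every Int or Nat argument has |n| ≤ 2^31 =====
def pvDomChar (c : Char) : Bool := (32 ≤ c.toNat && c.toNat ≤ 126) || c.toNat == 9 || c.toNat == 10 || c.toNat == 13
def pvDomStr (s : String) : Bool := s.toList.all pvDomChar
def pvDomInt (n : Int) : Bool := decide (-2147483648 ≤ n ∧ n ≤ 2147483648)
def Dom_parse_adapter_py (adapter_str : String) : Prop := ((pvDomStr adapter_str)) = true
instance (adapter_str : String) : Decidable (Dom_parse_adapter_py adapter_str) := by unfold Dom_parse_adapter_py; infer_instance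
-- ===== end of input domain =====

-- B replaces A's four membership scans over the token list with one accumulating pass over the tokens; same return value.

-- ===== PORT A =====
-- shared helper: Python's s.strip().lower()
def pvNorm (s : String) : String := PySem.Str.lower (PySem.Str.strip s)

def parse_adapter_py (adapter_str : String) : Bool × Bool × Bool × Bool :=
  if adapter_str = "" then (false, false, false, false)
  else
    -- sep "," is non-empty, so split? is always `some`; getD [] is never taken
    let parts := ((PySem.Str.split? adapter_str ",").getD []).map
      (fun s => pvNorm s)
    (parts.contains "top" || parts.contains "all",
     parts.contains "bottom" || parts.contains "all",
     parts.contains "left" || parts.contains "all",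
     parts.contains "right" || parts.contains "all")

-- ===== PORT B =====
def pvStep (acc : Bool × Bool × Bool × Bool) (tok : String) : Bool × Bool × Bool × Bool :=
  if pvNorm tok = "all" then (true, true, true, true)
  else if pvNorm tok = "top" then (true, acc.2.1, acc.2.2.1, acc.2.2.2)
  else if pvNorm tok = "bottom" then (acc.1, true, acc.2.2.1, acc.2.2.2)
  else if pvNorm tok = "left" then (acc.1, acc.2.1, true, acc.2.2.2)
  else if pvNorm tok = "right" then (acc.1, acc.2.1, acc.2.2.1, true)
  else acc

def parse_adapter_py_alt (adapter_str : String) : Bool × Bool × Bool × Bool :=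
  if adapter_str = "" then (false, false, false, false)
  else ((PySem.Str.split? adapter_str ",").getD []).foldl pvStep (false, false, false, false)

-- ===== PRECONDITION & SPEC =====
def Spec_parse_adapter_py (adapter_str : String) (out : Bool × Bool × Bool × Bool) : Prop := out = parse_adapter_py_alt adapter_str
instance (adapter_str : String) (out : Bool × Bool × Bool × Bool) : Decidable (Spec_parse_adapter_py adapter_str out) := by unfold Spec_parse_adapter_py; infer_instance

-- ===== CLAIM (what is proved, stated in full; the proofs are below) =====
def Claim_equal_parse_adapter_py : Prop := ∀ (adapter_str : String), Dom_parse_adapter_py adapter_str → Spec_parse_adapter_py adapter_str (parse_adapter_py adapter_str)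

-- ===== LEMMAS AND PROOFS =====

-- One pass of B computes exactly the membership tests A performs.
theorem pvFold_spec (l : List String) (a b c d : Bool) :
    l.foldl pvStep (a, b, c, d) =
      (a || (l.map (fun s => pvNorm s)).contains "top"
         || (l.map (fun s => pvNorm s)).contains "all",
       b || (l.map (fun s => pvNorm s)).contains "bottom"
         || (l.map (fun s => pvNorm s)).contains "all",
       c || (l.map (fun s => pvNorm s)).contains "left"
         || (l.map (fun s => pvNorm s)).contains "all",
       d || (l.map (fun s => pvNorm s)).contains "right"
         || (l.map (fun s => pvNorm s)).contains "all") := by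
  induction l generalizing a b c d with
  | nil => simp
  | cons t l ih =>
    rw [List.foldl_cons, ih]
    clear ih
    simp only [List.map_cons, List.contains_cons, pvStep]
    split_ifs with h1 h2 h3 h4 h5
    · simp_all
    · simp_all
    · simp_all
    · simp_all
    · simp_all
    · simp [beq_eq_false_iff_ne.mpr (Ne.symm h1), beq_eq_false_iff_ne.mpr (Ne.symm h2),
        beq_eq_false_iff_ne.mpr (Ne.symm h3), beq_eq_false_iff_ne.mpr (Ne.symm h4),
        beq_eq_false_iff_ne.mpr (Ne.symm h5)]

-- ===== VERDICT (by name: the statement is the Claim_ definition above) =====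
theorem parse_adapter_py_spec : Claim_equal_parse_adapter_py := by
  intro s _
  unfold Spec_parse_adapter_py parse_adapter_py parse_adapter_py_alt
  split_ifs with h
  · rfl
  · rw [pvFold_spec]
    simp
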